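-- pv_equiv track=rewrite | github.com/essorsk/Algo-2019-04 | Algo_c/0ll_codes6_sort.py | median_square
-- ===== SOURCE A (Python) =====
-- def median_square(array):
--     for i in range(len(array)):
--         smaller = equal = bigger = 0
--         for j in range(len(array)):
--             if array[i] < array[j]:
--                 smaller += 1
--             elif array[i] > array[j]:
--                 bigger += 1
--             else:
--                 equal += 1
--         equal -= 1
--
--         if smaller == bigger or smaller == equal + bigger or smaller + equal == bigger:
--             return array[i]
-- ===== SOURCE B (Python) =====
-- def median_square(array):
--     srt = sorted(array)
--     n = len(srt)
--     lo = {}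
--     hi = {}
--     for i, v in enumerate(srt):
--         if v not in lo:
--             lo[v] = i
--         hi[v] = i
--     for x in array:
--         b = lo[x]
--         h = hi[x]
--         s = n - 1 - h
--         e = h - b
--         if s == b or s == e + b or s + e == b:
--             return x
--     return None
-- ===== Notes on version B (the rewrite author's own statement) =====
-- stated objective: faster
-- what changed: B sorts the list once and builds first/last-occurrence index maps over the sorted copy, then scans the original order deriving each element's smaller/equal/bigger counts from those indices, instead of A's nested recount for every element.
import Mathlib
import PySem

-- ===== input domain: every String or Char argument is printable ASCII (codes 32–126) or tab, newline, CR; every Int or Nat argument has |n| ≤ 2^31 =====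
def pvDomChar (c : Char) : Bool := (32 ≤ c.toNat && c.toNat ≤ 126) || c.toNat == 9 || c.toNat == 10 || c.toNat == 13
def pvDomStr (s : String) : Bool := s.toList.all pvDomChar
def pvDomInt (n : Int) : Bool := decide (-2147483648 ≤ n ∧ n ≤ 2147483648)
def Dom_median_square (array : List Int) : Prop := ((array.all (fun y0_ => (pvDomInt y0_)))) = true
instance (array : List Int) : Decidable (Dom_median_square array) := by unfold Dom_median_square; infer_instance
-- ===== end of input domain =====

-- B replaces A's quadratic nested recount by one sort plus index maps; same return value everywhere.

-- ===== PORT A =====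
-- inner 'for j' loop of A: one pass over the array with the three counters
def msCounts (array : List Int) (x : Int) : Int × Int × Int :=
  array.foldl (fun acc y =>
    if x < y then (acc.1 + 1, acc.2.1, acc.2.2)
    else if x > y then (acc.1, acc.2.1 + 1, acc.2.2)
    else (acc.1, acc.2.1, acc.2.2 + 1)) (0, 0, 0)

-- outer 'for i' loop of A (iterating array[i] over the list), returning at the first hit
def msFind (array : List Int) : List Int → Option Int
  | [] => none
  | x :: rest =>
      let c := msCounts array x
      let smaller := c.1
      let bigger := c.2.1
      let equal := c.2.2 - 1
      if smaller = bigger ∨ smaller = equal + bigger ∨ smaller + equal = bigger then some x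
      else msFind array rest

def median_square (array : List Int) : Option Int := msFind array array

-- ===== PORT B =====
-- 'for i, v in enumerate(srt)' building the first- and last-index dicts (k is the running index)
def msBuild (k : Int) (lo hi : PySem.Dict Int Int) : List Int → (PySem.Dict Int Int × PySem.Dict Int Int)
  | [] => (lo, hi)
  | v :: rest =>
      let lo' := if lo.contains v then lo else lo.insert v k
      msBuild (k + 1) lo' (hi.insert v k) rest

-- 'for x in array' scan; lo[x]/hi[x] always hit (x occurs in srt), so getD is exact here
def msScan (lo hi : PySem.Dict Int Int) (n : Int) : List Int → Option Int
  | [] => none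
  | x :: rest =>
      let b := lo.getD x 0
      let h := hi.getD x 0
      let s := n - 1 - h
      let e := h - b
      if s = b ∨ s = e + b ∨ s + e = b then some x else msScan lo hi n rest

def median_square_alt (array : List Int) : Option Int :=
  let srt := PySem.List.sorted array (fun x => x) false
  let n : Int := (srt.length : Int)
  let p := msBuild 0 PySem.Dict.empty PySem.Dict.empty srt
  msScan p.1 p.2 n array

-- ===== PRECONDITION & SPEC =====
def Spec_median_square (array : List Int) (out : Option Int) : Prop := out = median_square_alt array
instance (array : List Int) (out : Option Int) : Decidable (Spec_median_square array out) := by unfold Spec_median_square; infer_instance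

-- ===== CLAIM (what is proved, stated in full; the proofs are below) =====
def Claim_equal_median_square : Prop := ∀ (array : List Int), Dom_median_square array → Spec_median_square array (median_square array)

-- ===== LEMMAS AND PROOFS =====

lemma msCounts_go (x : Int) (l : List Int) : ∀ (a b c : Int),
    l.foldl (fun acc y =>
      if x < y then (acc.1 + 1, acc.2.1, acc.2.2)
      else if x > y then (acc.1, acc.2.1 + 1, acc.2.2)
      else (acc.1, acc.2.1, acc.2.2 + 1)) (a, b, c)
    = (a + (l.countP (fun y => decide (x < y)) : Int),
       b + (l.countP (fun y => decide (y < x)) : Int),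
       c + (l.count x : Int)) := by
  induction l with
  | nil => intro a b c; simp
  | cons y t ih =>
    intro a b c
    simp only [List.foldl_cons, List.countP_cons, List.count_cons]
    rcases lt_trichotomy x y with h | h | h
    · have h1 : ¬ y < x := not_lt.mpr (le_of_lt h)
      simp only [if_pos h, ih]
      simp [h, h1]
      omega
    · subst h
      simp only [gt_iff_lt, if_neg (lt_irrefl x), ih]
      simp
      omega
    · have h1 : ¬ x < y := not_lt.mpr (le_of_lt h)
      simp only [if_neg h1, gt_iff_lt, if_pos h, ih]
      simp [h1, h]
      omega

lemma msCounts_eq (array : List Int) (x : Int) :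
    msCounts array x = ((array.countP (fun y => decide (x < y)) : Int),
      (array.countP (fun y => decide (y < x)) : Int), (array.count x : Int)) := by
  simpa using msCounts_go x array 0 0 0

lemma msBuild_lo_stable : ∀ (s : List Int) (k : Int) (lo hi : PySem.Dict Int Int) (v : Int),
    lo.contains v = true → ((msBuild k lo hi s).1).get? v = lo.get? v := by
  intro s
  induction s with
  | nil => intro k lo hi v hv; rfl
  | cons x t ih =>
    intro k lo hi v hv
    simp only [msBuild]
    by_cases hc : lo.contains x = true
    · rw [if_pos hc]; exact ih _ _ _ _ hv
    · rw [if_neg hc]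
      have hvx : v ≠ x := by rintro rfl; exact hc hv
      rw [ih _ _ _ _ (by rw [PySem.Dict.contains_insert]; simp [hv])]
      exact PySem.Dict.get?_insert_of_ne _ _ hvx

lemma msBuild_hi_stable : ∀ (s : List Int) (k : Int) (lo hi : PySem.Dict Int Int) (v : Int),
    v ∉ s → ((msBuild k lo hi s).2).get? v = hi.get? v := by
  intro s
  induction s with
  | nil => intro k lo hi v _; rfl
  | cons x t ih =>
    intro k lo hi v hv
    simp only [msBuild]
    have hvx : v ≠ x := fun h => hv (h ▸ List.mem_cons_self)
    rw [ih _ _ _ _ (fun h => hv (List.mem_cons_of_mem _ h))]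
    exact PySem.Dict.get?_insert_of_ne _ _ hvx

lemma msBuild_lo_getD : ∀ (s : List Int), s.Pairwise (· ≤ ·) →
    ∀ (k : Int) (lo hi : PySem.Dict Int Int) (v : Int), v ∈ s → lo.contains v = false →
    ((msBuild k lo hi s).1).getD v 0 = k + (s.countP (fun y => decide (y < v)) : Int) := by
  intro s
  induction s with
  | nil => intro _ k lo hi v hv; cases hv
  | cons x t ih =>
    intro hp k lo hi v hv hcv
    obtain ⟨hx, ht⟩ := List.pairwise_cons.mp hp
    simp only [msBuild]
    by_cases hvx : v = x
    · subst hvx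
      rw [if_neg (by simp [hcv])]
      have : ((msBuild (k+1) (lo.insert v k) (hi.insert v k) t).1).get? v = some k := by
        rw [msBuild_lo_stable t _ _ _ _ (PySem.Dict.contains_insert_self _ _ _),
          PySem.Dict.get?_insert_self]
      rw [PySem.Dict.getD_eq_get?_getD, this]
      have hz : t.countP (fun y => decide (y < v)) = 0 :=
        List.countP_eq_zero.mpr (fun y hy => by simpa using not_lt.mpr (hx y hy))
      simp [hz]
    · have hvt : v ∈ t := (List.mem_cons.mp hv).resolve_left hvx
      have hlt : x < v := lt_of_le_of_ne (hx v hvt) (fun h => hvx h.symm)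
      have hstep : ∀ lo' : PySem.Dict Int Int, lo'.contains v = false →
          ((msBuild (k+1) lo' (hi.insert x k) t).1).getD v 0
            = (k+1) + (t.countP (fun y => decide (y < v)) : Int) := fun lo' h =>
        ih ht (k+1) lo' _ v hvt h
      have hcnt : ((x :: t).countP (fun y => decide (y < v)) : Int)
          = (t.countP (fun y => decide (y < v)) : Int) + 1 := by
        rw [List.countP_cons]; simp [hlt]
      rw [hcnt]
      by_cases hc : lo.contains x = true
      · rw [if_pos hc, hstep lo hcv]; ring
      · rw [if_neg hc, hstep _ (by rw [PySem.Dict.contains_insert]; simp [hcv, hvx])]; ring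

lemma msBuild_hi_getD : ∀ (s : List Int), s.Pairwise (· ≤ ·) →
    ∀ (k : Int) (lo hi : PySem.Dict Int Int) (v : Int), v ∈ s →
    ((msBuild k lo hi s).2).getD v 0 = k + (s.countP (fun y => decide (y ≤ v)) : Int) - 1 := by
  intro s
  induction s with
  | nil => intro _ k lo hi v hv; cases hv
  | cons x t ih =>
    intro hp k lo hi v hv
    obtain ⟨hx, ht⟩ := List.pairwise_cons.mp hp
    simp only [msBuild]
    by_cases hvt : v ∈ t
    · have hle : x ≤ v := hx v hvt
      rw [ih ht (k+1) _ _ v hvt]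
      rw [List.countP_cons]
      simp [hle]
      ring
    · have hvx : v = x := ((List.mem_cons.mp hv).resolve_right hvt)
      subst hvx
      have : ((msBuild (k+1) (if lo.contains v then lo else lo.insert v k) (hi.insert v k) t).2).get? v
          = some k := by
        rw [msBuild_hi_stable t _ _ _ _ hvt, PySem.Dict.get?_insert_self]
      rw [PySem.Dict.getD_eq_get?_getD, this]
      have hz : t.countP (fun y => decide (y ≤ v)) = 0 :=
        List.countP_eq_zero.mpr (fun y hy => by
          simp
          rcases lt_or_eq_of_le (hx y hy) with h | h
          · exact h
          · exact absurd (h ▸ hy) hvt)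
      simp [hz]

lemma countP_le_split (l : List Int) (x : Int) :
    l.countP (fun y => decide (y ≤ x)) = l.countP (fun y => decide (y < x)) + l.count x := by
  induction l with
  | nil => simp
  | cons y t ih =>
    simp only [List.countP_cons, List.count_cons, ih]
    rcases lt_trichotomy y x with h | h | h
    · simp [h, le_of_lt h, Int.ne_of_lt h]
      omega
    · subst h; simp; omega
    · simp [not_le.mpr h, not_lt.mpr (le_of_lt h), (Int.ne_of_lt h).symm]

lemma countP_total (l : List Int) (x : Int) :
    l.countP (fun y => decide (x < y)) + l.countP (fun y => decide (y < x)) + l.count x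
      = l.length := by
  induction l with
  | nil => simp
  | cons y t ih =>
    simp only [List.countP_cons, List.count_cons, List.length_cons]
    rcases lt_trichotomy y x with h | h | h
    · simp [h, not_lt.mpr (le_of_lt h), Int.ne_of_lt h]; omega
    · subst h; simp; omega
    · simp [h, not_lt.mpr (le_of_lt h), (Int.ne_of_lt h).symm]; omega

lemma scan_eq (array : List Int) (lo hi : PySem.Dict Int Int)
    (hlo : ∀ x ∈ array, lo.getD x 0 = (array.countP (fun y => decide (y < x)) : Int))
    (hhi : ∀ x ∈ array, hi.getD x 0
        = (array.countP (fun y => decide (y < x)) : Int) + (array.count x : Int) - 1) :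
    ∀ l : List Int, (∀ x ∈ l, x ∈ array) →
      msFind array l = msScan lo hi (array.length : Int) l := by
  intro l
  induction l with
  | nil => intro _; rfl
  | cons x rest ih =>
    intro hsub
    have hxa : x ∈ array := hsub x List.mem_cons_self
    have htot := countP_total array x
    simp only [msFind, msScan, msCounts_eq]
    rw [hlo x hxa, hhi x hxa]
    apply if_congr
    · omega
    · rfl
    · exact ih (fun y hy => hsub y (List.mem_cons_of_mem _ hy))

-- ===== VERDICT (by name: the statement is the Claim_ definition above) =====
theorem median_square_spec : Claim_equal_median_square := by
  intro array _
  show median_square array = median_square_alt array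
  unfold median_square median_square_alt
  have hperm : (PySem.List.sorted array (fun x => x) false).Perm array :=
    PySem.List.sorted_perm array (fun x => x) false
  have hp : (PySem.List.sorted array (fun x => x) false).Pairwise (· ≤ ·) := by
    simpa using PySem.List.sorted_pairwise (xs := array) (key := fun x => x)
  have hlo : ∀ x ∈ array,
      ((msBuild 0 PySem.Dict.empty PySem.Dict.empty (PySem.List.sorted array (fun x => x) false)).1).getD x 0
        = (array.countP (fun y => decide (y < x)) : Int) := by
    intro x hxa
    rw [msBuild_lo_getD _ hp 0 _ _ x (hperm.mem_iff.mpr hxa) (by simp [PySem.Dict.contains_empty]),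
      hperm.countP_eq]
    ring
  have hhi : ∀ x ∈ array,
      ((msBuild 0 PySem.Dict.empty PySem.Dict.empty (PySem.List.sorted array (fun x => x) false)).2).getD x 0
        = (array.countP (fun y => decide (y < x)) : Int) + (array.count x : Int) - 1 := by
    intro x hxa
    rw [msBuild_hi_getD _ hp 0 _ _ x (hperm.mem_iff.mpr hxa), hperm.countP_eq,
      countP_le_split]
    push_cast; ring
  have hlen : ((PySem.List.sorted array (fun x => x) false).length : Int) = (array.length : Int) := by
    rw [hperm.length_eq]
  simp only [hlen]
  exact scan_eq array _ _ hlo hhi array (fun y hy => hy)
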